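-- pv_equiv track=rewrite | github.com/LysanderGG/AdventOfCode2016 | day07.py | split_inside_outside
-- ===== SOURCE A (Python) =====
-- def split_inside_outside(str, start_char, end_char):
--     outside = [] # list of substrings outside of the brackets
--     inside = [] # list of substrings inside the brackets
--
--     s = str
--     while len(s) > 0:
--         pre, _, s = s.partition(start_char)
--         outside.append(pre)
--
--         if len(s) > 0:
--             hypernet, _, s = s.partition(end_char)
--             inside.append(hypernet)
--
--     return inside, outside
-- ===== SOURCE B (Python) =====
-- def split_inside_outside(str, start_char, end_char):
--     # Single index-scan over the original string: no repeated remainder copies.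
--     inside = []
--     outside = []
--     n = len(str)
--     i = 0
--     while i < n:
--         j = str.find(start_char, i)
--         if j == -1:
--             outside.append(str[i:])
--             break
--         outside.append(str[i:j])
--         i = j + len(start_char)
--         if i >= n:
--             break
--         k = str.find(end_char, i)
--         if k == -1:
--             inside.append(str[i:])
--             break
--         inside.append(str[i:k])
--         i = k + len(end_char)
--     return inside, outside
-- ===== Notes on version B (the rewrite author's own statement) =====
-- stated objective: faster
-- what changed: B replaces A's repeated s.partition loop (which re-copies the whole remaining string on every bracket) with a single index scan over the original string using str.find(sub, i), copying only the emitted pieces.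
import Mathlib
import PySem

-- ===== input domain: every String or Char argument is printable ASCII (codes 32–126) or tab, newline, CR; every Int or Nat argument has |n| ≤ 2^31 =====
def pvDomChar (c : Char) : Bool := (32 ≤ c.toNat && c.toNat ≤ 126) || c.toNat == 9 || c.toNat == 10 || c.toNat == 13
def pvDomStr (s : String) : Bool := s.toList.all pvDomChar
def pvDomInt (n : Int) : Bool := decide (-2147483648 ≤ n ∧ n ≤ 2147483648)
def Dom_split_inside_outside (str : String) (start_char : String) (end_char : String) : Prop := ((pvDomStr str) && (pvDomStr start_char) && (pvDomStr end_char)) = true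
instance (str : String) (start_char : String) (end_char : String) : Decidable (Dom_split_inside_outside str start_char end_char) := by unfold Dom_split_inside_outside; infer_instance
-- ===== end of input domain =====

-- B replaces A's repeated partition (copying the remainder each time) with one index scan via find(sub, i); return value only, no mutation.

-- ===== PORT A =====
-- s.partition(sep) for sep ≠ "" : (part before first occurrence, part after it); Python's (s, '', '') when absent.
def pvPartA (s sep : List Char) : List Char × List Char :=
  let j := PySem.Chars.find s sep
  if j = -1 then (s, [])
  else (s.take j.toNat, s.drop (j.toNat + sep.length))

-- used by pvLoopA's decreasing_by
theorem pvPartA_snd_lt (s sep : List Char) (hsep : sep ≠ []) (hs : 0 < s.length) :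
    (pvPartA s sep).2.length < s.length := by
  have hlen : 0 < sep.length := List.length_pos_iff.mpr hsep
  by_cases h : PySem.Chars.find s sep = -1
  · simpa [pvPartA, h] using hs
  · simp [pvPartA, h, List.length_drop]
    omega

-- A's while loop; the 'a = []' branch models Python's ValueError on an empty separator (excluded by Pre_).
def pvLoopA (a e : List Char) (s : List Char) (inside outside : List String) : List String × List String :=
  if h0 : s.length = 0 then (inside, outside)
  else if ha : a = [] then (inside, outside)
  else
    if h1 : (pvPartA s a).2.length = 0 then
      pvLoopA a e (pvPartA s a).2 inside (outside ++ [String.ofList (pvPartA s a).1])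
    else if he : e = [] then (inside, outside ++ [String.ofList (pvPartA s a).1])
    else
      pvLoopA a e (pvPartA (pvPartA s a).2 e).2
        (inside ++ [String.ofList (pvPartA (pvPartA s a).2 e).1])
        (outside ++ [String.ofList (pvPartA s a).1])
termination_by s.length
decreasing_by
  · omega
  · exact Nat.lt_trans (pvPartA_snd_lt (pvPartA s a).2 e he (by omega))
      (pvPartA_snd_lt s a ha (by omega))

def split_inside_outside (str : String) (start_char : String) (end_char : String) : List String × List String :=
  pvLoopA start_char.toList end_char.toList str.toList [] []

-- ===== PORT B =====
-- B's while loop over an index i into the fixed string cs; str.find(sub, i) = PySem.Chars.findFrom.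
-- The final 'else (inside, outside)' is a pure totality guard: no progress is possible only when
-- both separators are empty, where the Python B does not terminate (outside Pre_).
def pvLoopB (cs a e : List Char) (i : Nat) (inside outside : List String) : List String × List String :=
  if hI : i < cs.length then
    if PySem.Chars.findFrom cs a (i : Int) none = -1 then
      (inside, outside ++ [String.ofList (cs.drop i)])
    else
      if cs.length ≤ (PySem.Chars.findFrom cs a (i : Int) none).toNat + a.length then
        (inside, outside ++ [String.ofList ((cs.drop i).take ((PySem.Chars.findFrom cs a (i : Int) none).toNat - i))])
      else
        if PySem.Chars.findFrom cs e (((PySem.Chars.findFrom cs a (i : Int) none).toNat + a.length : Nat) : Int) none = -1 then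
          (inside ++ [String.ofList (cs.drop ((PySem.Chars.findFrom cs a (i : Int) none).toNat + a.length))],
           outside ++ [String.ofList ((cs.drop i).take ((PySem.Chars.findFrom cs a (i : Int) none).toNat - i))])
        else
          if hprog : i < (PySem.Chars.findFrom cs e (((PySem.Chars.findFrom cs a (i : Int) none).toNat + a.length : Nat) : Int) none).toNat + e.length then
            pvLoopB cs a e
              ((PySem.Chars.findFrom cs e (((PySem.Chars.findFrom cs a (i : Int) none).toNat + a.length : Nat) : Int) none).toNat + e.length)
              (inside ++ [String.ofList ((cs.drop ((PySem.Chars.findFrom cs a (i : Int) none).toNat + a.length)).take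
                ((PySem.Chars.findFrom cs e (((PySem.Chars.findFrom cs a (i : Int) none).toNat + a.length : Nat) : Int) none).toNat
                  - ((PySem.Chars.findFrom cs a (i : Int) none).toNat + a.length)))])
              (outside ++ [String.ofList ((cs.drop i).take ((PySem.Chars.findFrom cs a (i : Int) none).toNat - i))])
          else (inside, outside)
  else (inside, outside)
termination_by cs.length - i
decreasing_by omega

def split_inside_outside_alt (str : String) (start_char : String) (end_char : String) : List String × List String :=
  pvLoopB str.toList start_char.toList end_char.toList 0 [] []

-- ===== PRECONDITION & SPEC =====
-- Pre_ excludes exactly the inputs on which A raises ValueError ('empty separator'): a nonempty str with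
-- start_char = "", and end_char = "" when some occurrence of start_char is followed by a nonempty rest.
def Pre_split_inside_outside (str : String) (start_char : String) (end_char : String) : Prop :=
  (str.toList = [] ∨ start_char.toList ≠ []) ∧
  (end_char.toList = [] →
    PySem.Chars.find str.toList start_char.toList = -1 ∨
    str.toList.length ≤ (PySem.Chars.find str.toList start_char.toList).toNat + start_char.toList.length)
instance (str : String) (start_char : String) (end_char : String) : Decidable (Pre_split_inside_outside str start_char end_char) := by unfold Pre_split_inside_outside; infer_instance

def pvWitness_split_inside_outside : String × String × String := ("ab[cd]ef[gh", "[", "]")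

def Spec_split_inside_outside (str : String) (start_char : String) (end_char : String) (out : List String × List String) : Prop := out = split_inside_outside_alt str start_char end_char
instance (str : String) (start_char : String) (end_char : String) (out : List String × List String) : Decidable (Spec_split_inside_outside str start_char end_char out) := by unfold Spec_split_inside_outside; infer_instance

-- ===== CLAIM (what is proved, stated in full; the proofs are below) =====
def Claim_equal_split_inside_outside : Prop := ∀ (str : String) (start_char : String) (end_char : String), Dom_split_inside_outside str start_char end_char → Pre_split_inside_outside str start_char end_char → Spec_split_inside_outside str start_char end_char (split_inside_outside str start_char end_char)

-- ===== LEMMAS AND PROOFS =====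

theorem pvLoopA_nil (a e : List Char) (inside outside : List String) :
    pvLoopA a e [] inside outside = (inside, outside) := by
  unfold pvLoopA; simp

-- the loop correspondence: A's state s is the suffix cs.drop i of B's fixed string
theorem pvLoop_eq (cs a e : List Char) (ha : a ≠ []) :
    ∀ (m i : Nat), cs.length - i ≤ m → i ≤ cs.length →
      (e = [] → (PySem.Chars.find (cs.drop i) a = -1 ∨
        (cs.drop i).length ≤ (PySem.Chars.find (cs.drop i) a).toNat + a.length)) →
      ∀ (inside outside : List String),
      pvLoopA a e (cs.drop i) inside outside = pvLoopB cs a e i inside outside := by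
  intro m
  induction m with
  | zero =>
    intro i hm hi hinv inside outside
    have hie : i = cs.length := by omega
    rw [pvLoopA, pvLoopB]
    simp [hie]
  | succ m ih =>
    intro i hm hi hinv inside outside
    by_cases hI : i < cs.length
    · have hal : 0 < a.length := List.length_pos_iff.mpr ha
      have hld : (cs.drop i).length = cs.length - i := by simp
      have hff : PySem.Chars.findFrom cs a (i : Int) none =
          if PySem.Chars.find (cs.drop i) a = -1 then -1
          else i + PySem.Chars.find (cs.drop i) a :=
        PySem.Chars.findFrom_natCast cs a i (by omega)
      rw [pvLoopA, pvLoopB, dif_neg (by omega : ¬ (cs.drop i).length = 0), dif_neg ha,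
        dif_pos hI]
      by_cases hj : PySem.Chars.find (cs.drop i) a = -1
      · -- start_char not found in the suffix
        have hp : pvPartA (cs.drop i) a = (cs.drop i, []) := by simp [pvPartA, hj]
        rw [hp]
        simp only [hff, if_pos hj]
        simp [pvLoopA_nil]
      · have hj0 : 0 ≤ PySem.Chars.find (cs.drop i) a := by
          have := PySem.Chars.neg_one_le_find (cs.drop i) a
          omega
        set j' : Nat := (PySem.Chars.find (cs.drop i) a).toNat with hj'def
        have hjt : (i + PySem.Chars.find (cs.drop i) a).toNat = i + j' := by omega
        have hp : pvPartA (cs.drop i) a =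
            ((cs.drop i).take j', cs.drop (i + j' + a.length)) := by
          simp [pvPartA, hj, List.drop_drop]
          constructor
          · omega
          · congr 1; omega
        rw [hp]
        simp only [hff, if_neg hj, hjt]
        rw [if_neg (by omega : ¬ (i + PySem.Chars.find (cs.drop i) a) = -1)]
        have htk : i + j' - i = j' := by omega
        rw [htk]
        by_cases hend : cs.length ≤ i + j' + a.length
        · -- rest after start_char is empty: loop ends
          have hnil : cs.drop (i + j' + a.length) = [] := List.drop_eq_nil_iff.mpr hend
          rw [if_pos hend, hnil]
          simp [pvLoopA_nil]
        · rw [if_neg hend]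
          have hlen1 : (cs.drop (i + j' + a.length)).length = cs.length - (i + j' + a.length) := by
            simp
          have he : e ≠ [] := by
            intro he0
            rcases hinv he0 with h | h
            · exact hj h
            · omega
          have hel : 0 < e.length := List.length_pos_iff.mpr he
          rw [dif_neg (by omega : ¬ (cs.drop (i + j' + a.length)).length = 0), dif_neg he]
          have hff2 : PySem.Chars.findFrom cs e ((i + j' + a.length : Nat) : Int) none =
              if PySem.Chars.find (cs.drop (i + j' + a.length)) e = -1 then -1
              else (i + j' + a.length : Nat) + PySem.Chars.find (cs.drop (i + j' + a.length)) e :=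
            PySem.Chars.findFrom_natCast cs e (i + j' + a.length) (by omega)
          by_cases hk : PySem.Chars.find (cs.drop (i + j' + a.length)) e = -1
          · have hq : pvPartA (cs.drop (i + j' + a.length)) e = (cs.drop (i + j' + a.length), []) := by
              simp [pvPartA, hk]
            rw [hq]
            simp only [hff2, if_pos hk]
            rw [pvLoopA_nil]
            simp
          · have hk0 : 0 ≤ PySem.Chars.find (cs.drop (i + j' + a.length)) e := by
              have := PySem.Chars.neg_one_le_find (cs.drop (i + j' + a.length)) e
              omega
            set k' : Nat := (PySem.Chars.find (cs.drop (i + j' + a.length)) e).toNat with hk'def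
            have hkb : k' + e.length ≤ (cs.drop (i + j' + a.length)).length := by
              have hpre := (PySem.Chars.find_spec hk0).1
              have := hpre.length_le
              simp only [List.length_drop] at this ⊢
              omega
            have hkt : ((i + j' + a.length : Nat) + PySem.Chars.find (cs.drop (i + j' + a.length)) e).toNat
                = i + j' + a.length + k' := by omega
            have hq : pvPartA (cs.drop (i + j' + a.length)) e =
                ((cs.drop (i + j' + a.length)).take k', cs.drop (i + j' + a.length + k' + e.length)) := by
              simp [pvPartA, hk, List.drop_drop]
              constructor
              · omega
              · congr 1; omega
            rw [hq]
            simp only [hff2, if_neg hk]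
            rw [if_neg (by omega : ¬ ((i + j' + a.length : Nat) + PySem.Chars.find (cs.drop (i + j' + a.length)) e) = -1)]
            simp only [hkt]
            rw [dif_pos (by omega : i < i + j' + a.length + k' + e.length)]
            have htk2 : i + j' + a.length + k' - (i + j' + a.length) = k' := by omega
            rw [htk2]
            exact ih (i + j' + a.length + k' + e.length) (by omega)
              (by simp only [List.length_drop] at hkb; omega)
              (fun he0 => absurd he0 he) _ _
    · have hie : i = cs.length := by omega
      rw [pvLoopA, pvLoopB]
      simp [hie]

theorem split_inside_outside_spec : Claim_equal_split_inside_outside := by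
  intro s sc ec hdom hpre
  unfold Spec_split_inside_outside split_inside_outside split_inside_outside_alt
  rcases hpre with ⟨hpre1, hpre2⟩
  by_cases hcs : s.toList = []
  · rw [pvLoopA, pvLoopB]
    simp [hcs]
  · have ha : sc.toList ≠ [] := by
      rcases hpre1 with h | h
      · exact absurd h hcs
      · exact h
    have h0 := pvLoop_eq s.toList sc.toList ec.toList ha s.toList.length 0 (by omega) (by omega)
      (by simpa using hpre2) [] []
    simpa using h0
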